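-- pv_equiv track=rewrite | github.com/AfanasevAndrey/etable2redmine | etable2redmine.py | split_raw_table_data_for_tables
-- ===== SOURCE A (Python) =====
-- HORIZONTAL_TABLE_SPLITTER = "#HSPLIT"
--
-- def split_raw_table_data_for_tables(raw_data : list(list())) -> list(list(list())):
--     '''
--     Функция делит весь полученный лист на отдельные таблицы. Прочитывает весь файл, в нем ищет HORIZONTAL_TABLE_SPLITTER, если
--     находит, то сохраняет все вычитанное как отдельную таблицу вида [[строка, номер, 1], [срока, номер, 2]]
--
--     Входные параметры:
--     raw_data - список списков, который содержит все данные, вычитанные из файла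
--
--     Возвращает трехмерный список вида [Таблица1, Таблица2]
--     '''
--     tables = []
--     table = []
--     for line in raw_data:
--         if HORIZONTAL_TABLE_SPLITTER in line:
--             table.append(line)
--             tables.append(table)
--             table = []
--         else:
--             table.append(line)
--     if table != []:
--         tables.append(table)
--     return tables
-- ===== SOURCE B (Python) =====
-- HORIZONTAL_TABLE_SPLITTER = "#HSPLIT"
--
-- def split_raw_table_data_for_tables(raw_data):
--     # Slice-based decomposition: repeatedly cut at the first splitter line (inclusive).
--     tables = []
--     rest = raw_data
--     while True:
--         k = next((i for i, line in enumerate(rest) if HORIZONTAL_TABLE_SPLITTER in line), None)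
--         if k is None:
--             if rest:
--                 tables.append(rest)
--             return tables
--         tables.append(rest[:k + 1])
--         rest = rest[k + 1:]
-- ===== Notes on version B (the rewrite author's own statement) =====
-- stated objective: alternative
-- what changed: Replaces A's element-by-element accumulation into a pending table with a cut-at-first-splitter loop that finds the next splitter index and slices the whole chunk (splitter inclusive) off the remainder, appending the tail only when non-empty.
import Mathlib
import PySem

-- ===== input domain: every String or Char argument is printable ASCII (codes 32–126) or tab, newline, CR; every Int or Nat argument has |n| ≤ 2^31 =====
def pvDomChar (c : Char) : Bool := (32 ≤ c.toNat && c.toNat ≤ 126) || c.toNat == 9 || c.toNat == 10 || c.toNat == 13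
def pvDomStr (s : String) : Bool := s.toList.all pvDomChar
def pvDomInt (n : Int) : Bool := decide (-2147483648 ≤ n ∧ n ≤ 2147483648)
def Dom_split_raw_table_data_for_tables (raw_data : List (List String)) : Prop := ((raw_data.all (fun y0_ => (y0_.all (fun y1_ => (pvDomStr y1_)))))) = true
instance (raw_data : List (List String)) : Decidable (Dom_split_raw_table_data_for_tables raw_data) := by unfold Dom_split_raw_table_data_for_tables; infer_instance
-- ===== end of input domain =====

-- B replaces A's element-by-element accumulation with a cut-at-first-splitter slicing loop (alternative decomposition, same cost).

-- ===== PORT A =====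
-- for line in raw_data: accumulate into (tables, table); then append the pending table if non-empty.
def split_raw_table_data_for_tables (raw_data : List (List String)) : List (List (List String)) :=
  let st := raw_data.foldl
    (fun (p : List (List (List String)) × List (List String)) line =>
      if decide ("#HSPLIT" ∈ line) then (p.1 ++ [p.2 ++ [line]], [])
      else (p.1, p.2 ++ [line]))
    ([], [])
  if st.2 ≠ [] then st.1 ++ [st.2] else st.1

-- ===== PORT B =====
-- the while loop of Source B: find the first splitter line, slice the chunk off (inclusive), recurse on the rest.
def split_raw_table_data_for_tables_alt (raw_data : List (List String)) : List (List (List String)) :=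
  match h : raw_data.dropWhile (fun l => !decide ("#HSPLIT" ∈ l)) with
  | [] => if raw_data.isEmpty then [] else [raw_data]
  | hd :: t =>
      (raw_data.takeWhile (fun l => !decide ("#HSPLIT" ∈ l)) ++ [hd]) :: split_raw_table_data_for_tables_alt t
termination_by raw_data.length
decreasing_by
  have hle := List.length_dropWhile_le (p := fun l => !decide ("#HSPLIT" ∈ l)) (l := raw_data)
  rw [h] at hle; simp at hle; omega

-- ===== PRECONDITION & SPEC =====
def Spec_split_raw_table_data_for_tables (raw_data : List (List String)) (out : List (List (List String))) : Prop := out = split_raw_table_data_for_tables_alt raw_data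
instance (raw_data : List (List String)) (out : List (List (List String))) : Decidable (Spec_split_raw_table_data_for_tables raw_data out) := by unfold Spec_split_raw_table_data_for_tables; infer_instance

-- ===== CLAIM (what is proved, stated in full; the proofs are below) =====
def Claim_equal_split_raw_table_data_for_tables : Prop := ∀ (raw_data : List (List String)), Dom_split_raw_table_data_for_tables raw_data → Spec_split_raw_table_data_for_tables raw_data (split_raw_table_data_for_tables raw_data)

-- ===== LEMMAS AND PROOFS =====

-- B's result when the first chunk still has the pending prefix `table` in front.
def pvG (table xs : List (List String)) : List (List (List String)) :=
  match xs.dropWhile (fun l => !decide ("#HSPLIT" ∈ l)) with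
  | [] => if table ++ xs = [] then [] else [table ++ xs]
  | hd :: t =>
      (table ++ xs.takeWhile (fun l => !decide ("#HSPLIT" ∈ l)) ++ [hd]) :: split_raw_table_data_for_tables_alt t

theorem pvG_nil_eq_alt (xs : List (List String)) :
    pvG [] xs = split_raw_table_data_for_tables_alt xs := by
  rw [split_raw_table_data_for_tables_alt]
  unfold pvG
  cases h : xs.dropWhile (fun l => !decide ("#HSPLIT" ∈ l)) with
  | nil => simp [List.isEmpty_iff]
  | cons hd t => simp

-- invariant of A's loop: finishing the fold from state (tables, table) yields tables ++ pvG table xs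
theorem pvAlt_unfold (xs : List (List String)) :
    (match List.dropWhile (fun l => !decide ("#HSPLIT" ∈ l)) xs with
      | [] => if xs = [] then [] else [xs]
      | hd :: t => (List.takeWhile (fun l => !decide ("#HSPLIT" ∈ l)) xs ++ [hd]) :: split_raw_table_data_for_tables_alt t)
    = split_raw_table_data_for_tables_alt xs := by
  rw [split_raw_table_data_for_tables_alt]
  cases h : xs.dropWhile (fun l => !decide ("#HSPLIT" ∈ l)) with
  | nil => simp [List.isEmpty_iff]
  | cons hd t => simp

theorem pvA_loop_eq (xs : List (List String)) :
    ∀ (tables : List (List (List String))) (table : List (List String)),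
    (let st := xs.foldl
        (fun (p : List (List (List String)) × List (List String)) line =>
          if decide ("#HSPLIT" ∈ line) then (p.1 ++ [p.2 ++ [line]], [])
          else (p.1, p.2 ++ [line]))
        (tables, table)
     if st.2 ≠ [] then st.1 ++ [st.2] else st.1)
    = tables ++ pvG table xs := by
  induction xs with
  | nil =>
      intro tables table
      unfold pvG
      by_cases h : table = [] <;> simp [h]
  | cons x xs ih =>
      intro tables table
      by_cases hx : "#HSPLIT" ∈ x
      · simp only [List.foldl_cons, hx, decide_true, if_pos]
        rw [ih]
        unfold pvG
        simp [hx, List.append_assoc]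
        exact pvAlt_unfold xs
      · simp only [List.foldl_cons, hx, decide_false, Bool.false_eq_true, if_neg, not_false_eq_true]
        rw [ih]
        unfold pvG
        rw [List.dropWhile_cons]
        cases h : xs.dropWhile (fun l => !decide ("#HSPLIT" ∈ l)) with
        | nil => simp [hx]
        | cons hd t => simp [hx, List.append_assoc]

-- ===== VERDICT (by name: the statement is the Claim_ definition above) =====
theorem split_raw_table_data_for_tables_spec : Claim_equal_split_raw_table_data_for_tables := by
  intro raw_data _
  unfold Spec_split_raw_table_data_for_tables split_raw_table_data_for_tables
  rw [pvA_loop_eq raw_data [] []]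
  simp [pvG_nil_eq_alt]
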